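-- pv_equiv track=rewrite | github.com/bailanluo/autofish | modules/data_collector/data_manager.py | validate_category_name
-- ===== SOURCE A (Python) =====
-- def validate_category_name(category: str) -> bool:
--     """
--     验证类别名称是否有效
--
--     Args:
--         category: 类别名称
--
--     Returns:
--         是否有效
--     """
--     if not category or not category.strip():
--         return False
--
--     # 检查是否包含非法字符
--     invalid_chars = ['<', '>', ':', '"', '|', '?', '*', '/', '\\']
--     for char in invalid_chars:
--         if char in category:
--             return False
--
--     return True
-- ===== SOURCE B (Python) =====
-- def validate_category_name(category: str) -> bool:
--     # One fused left-to-right pass: reject on the first illegal character,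
--     # and track whether any non-whitespace character has been seen
--     # (which is exactly "category.strip() is non-empty").
--     seen = False
--     for c in category:
--         if c in '<>:"|?*/\\':
--             return False
--         seen = seen or not c.isspace()
--     return seen
-- ===== Notes on version B (the rewrite author's own statement) =====
-- stated objective: alternative
-- what changed: A does a strip()-based emptiness guard followed by nine separate substring scans of the input; B is a single fused pass with a boolean accumulator that simultaneously rejects on the first illegal character and records whether a non-whitespace character was seen, returning that flag at the end.
import Mathlib
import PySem

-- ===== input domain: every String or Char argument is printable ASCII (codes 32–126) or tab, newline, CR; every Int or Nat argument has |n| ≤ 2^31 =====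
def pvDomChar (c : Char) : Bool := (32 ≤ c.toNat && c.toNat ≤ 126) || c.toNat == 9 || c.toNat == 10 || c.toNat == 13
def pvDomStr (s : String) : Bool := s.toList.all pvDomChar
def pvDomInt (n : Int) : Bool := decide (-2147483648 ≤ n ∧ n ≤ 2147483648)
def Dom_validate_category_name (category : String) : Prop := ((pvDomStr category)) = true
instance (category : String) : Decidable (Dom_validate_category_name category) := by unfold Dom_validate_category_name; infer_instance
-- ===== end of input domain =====

-- B replaces A's strip() guard plus nine substring scans with one fused pass carrying a
-- seen-non-whitespace accumulator and rejecting on the first illegal character (alternative).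

-- ===== PORT A =====
def validate_category_name (category : String) : Bool :=
  if category.toList.length = 0 || (PySem.Chars.strip category.toList).length = 0 then
    false
  else
    -- for char in invalid_chars: if char in category: return False
    let invalid_chars : List Char := ['<', '>', ':', '"', '|', '?', '*', '/', '\\']
    if invalid_chars.any (fun ch => category.toList.contains ch) then false
    else true

-- ===== PORT B =====
-- the constant string '<>:"|?*/\\' of Source B, as its character list
def vcnIllegal : List Char := ['<', '>', ':', '"', '|', '?', '*', '/', '\\']

-- Source B's loop: early return False on an illegal char, else accumulate `seen`
def vcnScan : List Char → Bool → Bool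
  | [], seen => seen
  | c :: cs, seen =>
    if vcnIllegal.contains c then false
    else vcnScan cs (seen || !PySem.Chars.isspace c)

def validate_category_name_alt (category : String) : Bool :=
  vcnScan category.toList false

-- ===== PRECONDITION & SPEC =====
def Spec_validate_category_name (category : String) (out : Bool) : Prop := out = validate_category_name_alt category
instance (category : String) (out : Bool) : Decidable (Spec_validate_category_name category out) := by unfold Spec_validate_category_name; infer_instance

-- ===== CLAIM =====
def Claim_equal_validate_category_name : Prop := ∀ (category : String), Dom_validate_category_name category → Spec_validate_category_name category (validate_category_name category)

-- ===== LEMMAS AND PROOFS =====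

-- closed form of Source B's loop
lemma vcnScan_eq (l : List Char) (seen : Bool) :
    vcnScan l seen =
      (!(l.any (fun c => vcnIllegal.contains c))
        && (seen || l.any (fun c => !PySem.Chars.isspace c))) := by
  induction l generalizing seen with
  | nil => simp [vcnScan]
  | cons c cs ih =>
    by_cases h : c ∈ vcnIllegal
    · simp [vcnScan, h]
    · simp [vcnScan, h, ih, Bool.or_assoc]

-- rstrip is empty iff everything is whitespace
lemma rstrip_eq_nil_iff (l : List Char) :
    PySem.Chars.rstrip l = [] ↔ l.all PySem.Chars.isspace := by
  simp [PySem.Chars.rstrip, List.dropWhile_eq_nil_iff]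

-- strip is empty iff everything is whitespace
lemma strip_eq_nil_iff (l : List Char) :
    PySem.Chars.strip l = [] ↔ l.all PySem.Chars.isspace := by
  rw [PySem.Chars.strip, rstrip_eq_nil_iff]
  unfold PySem.Chars.lstrip
  constructor
  · intro h
    have := List.takeWhile_append_dropWhile (p := PySem.Chars.isspace) (l := l)
    simp only [List.all_eq_true]
    intro c hc
    rw [← this] at hc
    rcases List.mem_append.mp hc with h1 | h1
    · exact List.mem_takeWhile_imp h1
    · exact (List.all_eq_true.mp h) c h1
  · intro h
    simp only [List.all_eq_true] at h ⊢
    intro c hc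
    exact h c ((List.dropWhile_sublist _).subset hc)

-- the two scan directions agree: some illegal char occurs in l ↔ some char of l is illegal
lemma any_contains_swap (inv l : List Char) :
    inv.any (fun ch => l.contains ch) = l.any (fun c => inv.contains c) := by
  rw [Bool.eq_iff_iff]
  simp only [List.any_eq_true, List.contains_iff_mem]
  exact ⟨fun ⟨c, h1, h2⟩ => ⟨c, h2, h1⟩, fun ⟨c, h1, h2⟩ => ⟨c, h2, h1⟩⟩

-- ===== VERDICT =====
theorem validate_category_name_spec : Claim_equal_validate_category_name := by
  intro category _
  unfold Spec_validate_category_name validate_category_name validate_category_name_alt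
  rw [vcnScan_eq]
  set l := category.toList with hl
  by_cases hs : PySem.Chars.strip l = []
  · -- all whitespace (includes the empty string): both sides are false
    have hall : l.all PySem.Chars.isspace = true := (strip_eq_nil_iff l).mp hs
    have hnone : l.any (fun c => !PySem.Chars.isspace c) = false := by
      simp only [List.any_eq_false]
      intro c hc
      simp [List.all_eq_true.mp hall c hc]
    simp [hs, hnone]
  · have hlen : (PySem.Chars.strip l).length ≠ 0 := by
      simpa [List.length_eq_zero_iff] using hs
    have hne : l.length ≠ 0 := by
      intro h0
      exact hs (by simp [List.length_eq_zero_iff.mp h0, strip_eq_nil_iff])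
    have hsome : l.any (fun c => !PySem.Chars.isspace c) = true := by
      by_contra h
      simp only [Bool.not_eq_true, List.any_eq_false] at h
      refine hs ((strip_eq_nil_iff l).mpr (List.all_eq_true.mpr fun c hc => ?_))
      simpa using h c hc
    simp only [hne, hlen, decide_false, Bool.or_self, Bool.false_eq_true, if_false]
    rw [show (['<', '>', ':', '"', '|', '?', '*', '/', '\\'] : List Char) = vcnIllegal from rfl,
        any_contains_swap, hsome]
    cases h : l.any (fun c => vcnIllegal.contains c) <;> simp [h]
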